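-- pv_equiv track=rewrite | github.com/dlwns97/Algorithm | 2022 카카오 블라인드/파괴되지 않은 건물.py | solution
-- ===== SOURCE A (Python) =====
-- def solution(board, skill):
--     answer = 0
--     skills = [[0] * (len(board[0]) + 1) for _ in range(len(board) + 1)]
--
--     for item in skill:
--         sType, r1, c1, r2, c2, degree = item
--         # 누적 합을 이용하여 시간 초과 탈피
--         skills[r1][c1] += degree*(-1) if sType==1 else degree
--         skills[r1][c2+1] += degree if sType==1 else degree*(-1)
--         skills[r2+1][c1] += degree if sType==1 else degree*(-1)
--         skills[r2+1][c2+1] += degree*(-1) if sType==1 else degree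
--     # 행, 열 방향 누적 합 - 순서 무관
--     for i in range(len(skills)-1):
--         for j in range(len(skills[0])-1):
--             skills[i][j+1] += skills[i][j]
--     for j in range(len(skills[0])-1):
--         for i in range(len(skills)-1):
--             skills[i+1][j] += skills[i][j]
--     # board에 반영
--     for i in range(len(board)):
--         for j in range(len(board[0])):
--             board[i][j]+=skills[i][j]
--         answer+=len([a for a in board[i] if a>0])
--
--     return answer
-- ===== SOURCE B (Python) =====
-- def solution(board, skill):
--     # Direct region updates instead of a difference array + prefix sums.
--     # Mutates board in place, like A.
--     for sType, r1, c1, r2, c2, degree in skill: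
--         delta = -degree if sType == 1 else degree
--         for i in range(r1, r2 + 1):
--             for j in range(c1, c2 + 1):
--                 board[i][j] += delta
--     return sum(len([a for a in row if a > 0]) for row in board)
-- ===== Notes on version B (the rewrite author's own statement) =====
-- stated objective: simpler
-- what changed: Replaces the (n+1)x(m+1) difference array with four corner marks and two prefix-sum passes by direct per-skill rectangle scans that add the delta to each covered cell, then one count of positive cells.
-- outside the precondition, e.g. on solution([[1, 2], [3, 4]], [[1, -1, 0, 0, 0, 1]]): A returns 4, B returns 3
import Mathlib
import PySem

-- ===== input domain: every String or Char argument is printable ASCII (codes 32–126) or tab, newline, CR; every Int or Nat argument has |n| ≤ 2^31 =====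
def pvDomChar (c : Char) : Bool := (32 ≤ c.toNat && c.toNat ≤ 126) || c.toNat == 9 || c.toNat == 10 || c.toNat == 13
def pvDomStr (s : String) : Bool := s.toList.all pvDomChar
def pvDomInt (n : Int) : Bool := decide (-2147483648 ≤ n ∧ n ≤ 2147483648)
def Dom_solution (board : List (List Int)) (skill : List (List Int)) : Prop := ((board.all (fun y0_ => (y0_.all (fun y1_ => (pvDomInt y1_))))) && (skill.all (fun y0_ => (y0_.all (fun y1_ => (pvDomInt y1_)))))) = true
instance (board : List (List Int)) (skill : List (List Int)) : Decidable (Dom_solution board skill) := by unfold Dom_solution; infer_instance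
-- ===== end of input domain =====

-- B replaces A's difference array (four corner marks + two prefix-sum passes) by direct
-- per-skill rectangle scans; equivalence is about the RETURN value only (both A and B
-- mutate `board` in place in Python, leaving it in the same final state).

-- ===== PORT A =====
-- Python 'g[i][j]' / 'g[i][j] += v' with in-range nonnegative indices (guaranteed by
-- Pre_solution wherever the ports use them)
def pvGet (g : List (List Int)) (i j : Nat) : Int := (g.getD i []).getD j 0

def pvAdd2 (g : List (List Int)) (i j : Nat) (v : Int) : List (List Int) :=
  g.modify i (fun row => row.modify j (· + v))

-- one iteration of A's first loop: the four corner marks of one skill row;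
-- a row that is not a 6-list makes Python raise ValueError (excluded by Pre_solution)
def pvCorners (g : List (List Int)) (item : List Int) : List (List Int) :=
  match item with
  | [sType, r1, c1, r2, c2, degree] =>
    let g1 := pvAdd2 g r1.toNat c1.toNat (if sType = 1 then -degree else degree)
    let g2 := pvAdd2 g1 r1.toNat (c2 + 1).toNat (if sType = 1 then degree else -degree)
    let g3 := pvAdd2 g2 (r2 + 1).toNat c1.toNat (if sType = 1 then degree else -degree)
    pvAdd2 g3 (r2 + 1).toNat (c2 + 1).toNat (if sType = 1 then -degree else degree)
  | _ => g

-- 'for i in range(len(skills)-1): for j in range(len(skills[0])-1): skills[i][j+1] += skills[i][j]'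
def pvRowPass (g : List (List Int)) (rows cols : Nat) : List (List Int) :=
  (List.range rows).foldl (fun g i =>
    (List.range cols).foldl (fun g j => pvAdd2 g i (j + 1) (pvGet g i j)) g) g

-- 'for j in range(len(skills[0])-1): for i in range(len(skills)-1): skills[i+1][j] += skills[i][j]'
def pvColPass (g : List (List Int)) (cols rows : Nat) : List (List Int) :=
  (List.range cols).foldl (fun g j =>
    (List.range rows).foldl (fun g i => pvAdd2 g (i + 1) j (pvGet g i j)) g) g

def solution (board : List (List Int)) (skill : List (List Int)) : Int :=
  let n := board.length
  let m := (board.getD 0 []).length   -- len(board[0]); board ≠ [] under Pre_solution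
  let skills0 := List.replicate (n + 1) (List.replicate (m + 1) (0 : Int))
  let s1 := skill.foldl pvCorners skills0
  let s2 := pvRowPass s1 (s1.length - 1) ((s1.getD 0 []).length - 1)
  let s3 := pvColPass s2 ((s2.getD 0 []).length - 1) (s2.length - 1)
  ((List.range n).foldl (fun (st : List (List Int) × Int) i =>
      let b := (List.range m).foldl (fun b j => pvAdd2 b i j (pvGet s3 i j)) st.1
      (b, st.2 + (((b.getD i []).filter (fun a => decide (a > 0))).length : Int)))
    (board, 0)).2

-- ===== PORT B =====
-- one skill row: add its delta to every covered cell directly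
def pvRectAdd (b : List (List Int)) (item : List Int) : List (List Int) :=
  match item with
  | [sType, r1, c1, r2, c2, degree] =>
    let delta := if sType = 1 then -degree else degree
    (PySem.List.pyRange r1 (r2 + 1) 1).foldl (fun b i =>
      (PySem.List.pyRange c1 (c2 + 1) 1).foldl (fun b j => pvAdd2 b i.toNat j.toNat delta) b) b
  | _ => b

def solution_alt (board : List (List Int)) (skill : List (List Int)) : Int :=
  let b := skill.foldl pvRectAdd board
  b.foldl (fun acc row => acc + ((row.filter (fun a => decide (a > 0))).length : Int)) 0

-- ===== PRECONDITION & SPEC =====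
-- Pre_solution restricts to the problem's natural domain: a nonempty board whose rows are
-- at least as long as the first row, and skill rows of exactly six values whose rectangle
-- lies inside the board; outside it A either raises (empty board, a row shorter than
-- row 0, a skill row that is not six long or reaches past the grid) or silently relies on
-- Python's negative-index wraparound on negative coordinates.
def Pre_solution (board : List (List Int)) (skill : List (List Int)) : Prop :=
  board ≠ [] ∧
  (∀ row ∈ board, (board.getD 0 []).length ≤ row.length) ∧
  ∀ item ∈ skill, item.length = 6 ∧
    0 ≤ item.getD 1 0 ∧ item.getD 1 0 ≤ item.getD 3 0 ∧
    item.getD 3 0 < (board.length : Int) ∧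
    0 ≤ item.getD 2 0 ∧ item.getD 2 0 ≤ item.getD 4 0 ∧
    item.getD 4 0 < (((board.getD 0 []).length : Nat) : Int)
instance (board : List (List Int)) (skill : List (List Int)) : Decidable (Pre_solution board skill) := by
  unfold Pre_solution; infer_instance

def pvWitness_solution : List (List Int) × List (List Int) :=
  ([[5, 5, 5], [5, 5, 5]], [[1, 0, 0, 1, 1, 6], [2, 1, 1, 1, 2, 2]])

def Spec_solution (board : List (List Int)) (skill : List (List Int)) (out : Int) : Prop := out = solution_alt board skill
instance (board : List (List Int)) (skill : List (List Int)) (out : Int) : Decidable (Spec_solution board skill out) := by unfold Spec_solution; infer_instance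

-- ===== CLAIM (what is proved, stated in full; the proofs are below) =====
def Claim_equal_solution : Prop := ∀ (board : List (List Int)) (skill : List (List Int)), Dom_solution board skill → Pre_solution board skill → Spec_solution board skill (solution board skill)

-- ===== LEMMAS AND PROOFS =====

-- the per-cell contribution of one skill row, and its corner-mark form
def pvDelta (item : List Int) : Int :=
  if item.getD 0 0 = 1 then -(item.getD 5 0) else item.getD 5 0

def pvContrib (item : List Int) (i j : Nat) : Int :=
  if item.getD 1 0 ≤ (i : Int) ∧ (i : Int) ≤ item.getD 3 0 ∧
     item.getD 2 0 ≤ (j : Int) ∧ (j : Int) ≤ item.getD 4 0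
  then pvDelta item else 0

def pvCorner (item : List Int) (i j : Nat) : Int :=
  pvDelta item
    * ((if (i : Int) = item.getD 1 0 then 1 else 0) - (if (i : Int) = item.getD 3 0 + 1 then 1 else 0))
    * ((if (j : Int) = item.getD 2 0 then 1 else 0) - (if (j : Int) = item.getD 4 0 + 1 then 1 else 0))

def pvT (skill : List (List Int)) (i j : Nat) : Int :=
  (skill.map (fun it => pvContrib it i j)).sum

-- a skill row valid for an n×m board
def pvValid (item : List Int) (n m : Nat) : Prop :=
  item.length = 6 ∧
  0 ≤ item.getD 1 0 ∧ item.getD 1 0 ≤ item.getD 3 0 ∧ item.getD 3 0 < (n : Int) ∧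
  0 ≤ item.getD 2 0 ∧ item.getD 2 0 ≤ item.getD 4 0 ∧ item.getD 4 0 < (m : Int)

def SameShape (g h : List (List Int)) : Prop :=
  g.length = h.length ∧ ∀ i, (g.getD i []).length = (h.getD i []).length

theorem sameShape_refl (g : List (List Int)) : SameShape g g := ⟨rfl, fun _ => rfl⟩

theorem sameShape_trans {g h k : List (List Int)} (h1 : SameShape g h) (h2 : SameShape h k) :
    SameShape g k := ⟨h1.1.trans h2.1, fun i => (h1.2 i).trans (h2.2 i)⟩

theorem getD_eq_getElem?_getD' (l : List (List Int)) (i : Nat) :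
    l.getD i [] = (l[i]?).getD [] := by
  simp [List.getD]

theorem sameShape_pvAdd2 (g : List (List Int)) (i j : Nat) (v : Int) :
    SameShape (pvAdd2 g i j v) g := by
  constructor
  · simp [pvAdd2]
  · intro i'
    rw [getD_eq_getElem?_getD', getD_eq_getElem?_getD', pvAdd2, List.getElem?_modify]
    by_cases h : i = i'
    · subst h
      cases hg : g[i]? with
      | none => simp
      | some row => simp
    · simp [h]

theorem sameShape_foldl {α : Type} (l : List α) (f : List (List Int) → α → List (List Int))
    (hf : ∀ b x, SameShape (f b x) b) (b : List (List Int)) :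
    SameShape (l.foldl f b) b := by
  induction l generalizing b with
  | nil => exact sameShape_refl b
  | cons x t ih => exact sameShape_trans (ih (f b x)) (hf b x)

theorem pvGet_pvAdd2 (g : List (List Int)) (i j : Nat) (v : Int)
    (hi : i < g.length) (hj : j < (g.getD i []).length) (i' j' : Nat) :
    pvGet (pvAdd2 g i j v) i' j' = pvGet g i' j' + (if i' = i ∧ j' = j then v else 0) := by
  unfold pvGet pvAdd2
  rw [getD_eq_getElem?_getD', getD_eq_getElem?_getD' g, List.getElem?_modify]
  by_cases h : i = i'
  · subst h
    rw [List.getElem?_eq_getElem hi]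
    have hrow : g.getD i [] = g[i] := by
      rw [getD_eq_getElem?_getD', List.getElem?_eq_getElem hi]; rfl
    simp only [if_true, Option.map_eq_map, Option.map_some, Option.getD_some, true_and]
    rw [List.getD_eq_getElem?_getD, List.getD_eq_getElem?_getD, List.getElem?_modify]
    by_cases h2 : j = j'
    · subst h2
      rw [List.getElem?_eq_getElem (hrow ▸ hj)]
      simp
    · simp [h2]; exact fun hc => absurd hc.symm h2
  · have h3 : ¬(i' = i ∧ j' = j) := fun hc => h hc.1.symm
    simp [h, h3]

-- the row lists at other indices are untouched by an add
theorem getD_pvAdd2_ne (g : List (List Int)) (i j : Nat) (v : Int) (i' : Nat) (h : i' ≠ i) :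
    (pvAdd2 g i j v).getD i' [] = g.getD i' [] := by
  rw [getD_eq_getElem?_getD', getD_eq_getElem?_getD', pvAdd2,
    List.getElem?_modify_ne _ _ (fun hc => h hc.symm)]
-- === fold-of-adds lemmas (B side) ===
theorem pvGet_foldl_col (js : List Int) (b : List (List Int)) (i0 : Nat) (δ : Int)
    (hi0 : i0 < b.length) (hjs : ∀ x ∈ js, 0 ≤ x ∧ x < ((b.getD i0 []).length : Int))
    (i j : Nat) :
    pvGet (js.foldl (fun b j => pvAdd2 b i0 j.toNat δ) b) i j
      = pvGet b i j + (if i = i0 then δ * (js.count (j : Int) : Int) else 0) := by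
  induction js generalizing b with
  | nil => simp
  | cons x t ih =>
    have hx := hjs x (List.mem_cons_self)
    have hshape := sameShape_pvAdd2 b i0 x.toNat δ
    simp only [List.foldl_cons]
    rw [ih (pvAdd2 b i0 x.toNat δ) (by rw [hshape.1]; exact hi0)
        (fun y hy => by rw [hshape.2 i0]; exact hjs y (List.mem_cons_of_mem _ hy))]
    rw [pvGet_pvAdd2 b i0 x.toNat δ hi0 (by omega) i j]
    rw [List.count_cons]
    by_cases hii : i = i0
    · subst hii
      by_cases hjx : (j : Int) = x
      · have hxt : j = x.toNat := by omega
        rw [hxt, if_pos rfl, if_pos ⟨rfl, rfl⟩, Int.toNat_of_nonneg hx.1, beq_self_eq_true]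
        simp only [if_true]
        push_cast
        ring
      · have h1 : ¬ (j = x.toNat) := by omega
        have h2 : (x == (j : Int)) = false := by simp; omega
        simp [h1, h2]
    · simp [hii]

theorem pvGet_foldl_rect (is js : List Int) (b : List (List Int)) (δ : Int)
    (his : ∀ x ∈ is, 0 ≤ x ∧ x < (b.length : Int))
    (hjs : ∀ x ∈ is, ∀ y ∈ js, 0 ≤ y ∧ y < ((b.getD x.toNat []).length : Int))
    (i j : Nat) :
    pvGet (is.foldl (fun b i =>
        js.foldl (fun b j => pvAdd2 b i.toNat j.toNat δ) b) b) i j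
      = pvGet b i j + δ * (is.count (i : Int) : Int) * (js.count (j : Int) : Int) := by
  induction is generalizing b with
  | nil => simp
  | cons x t ih =>
    have hx := his x (List.mem_cons_self)
    have hshape : SameShape (js.foldl (fun b j => pvAdd2 b x.toNat j.toNat δ) b) b :=
      sameShape_foldl js _ (fun b y => sameShape_pvAdd2 b x.toNat y.toNat δ) b
    simp only [List.foldl_cons]
    rw [ih (js.foldl (fun b j => pvAdd2 b x.toNat j.toNat δ) b)
        (fun y hy => by rw [hshape.1]; exact his y (List.mem_cons_of_mem _ hy))
        (fun y hy z hz => by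
          rw [hshape.2 y.toNat]; exact hjs y (List.mem_cons_of_mem _ hy) z hz)]
    rw [pvGet_foldl_col js b x.toNat δ (by omega)
        (fun z hz => hjs x List.mem_cons_self z hz) i j]
    rw [List.count_cons]
    by_cases hix : (i : Int) = x
    · have hxt : i = x.toNat := by omega
      rw [hxt, Int.toNat_of_nonneg hx.1, beq_self_eq_true]
      simp only [if_true]
      push_cast
      ring
    · have h1 : ¬ (i = x.toNat) := by omega
      have h2 : (x == (i : Int)) = false := by simp; omega
      simp [h1, h2]
theorem count_pyRange_one (a b x : Int) :
    ((PySem.List.pyRange a b 1).count x : Int) = if a ≤ x ∧ x < b then 1 else 0 := by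
  by_cases h : a ≤ x ∧ x < b
  · rw [if_pos h]
    have hm : x ∈ PySem.List.pyRange a b 1 := (PySem.List.mem_pyRange_one).mpr h
    have := List.count_eq_one_of_mem (PySem.List.nodup_pyRange_one a b) hm
    rw [this]; rfl
  · rw [if_neg h]
    have hm : x ∉ PySem.List.pyRange a b 1 := fun hc =>
      h ((PySem.List.mem_pyRange_one).mp hc)
    rw [List.count_eq_zero_of_not_mem hm]; rfl

theorem sameShape_pvRectAdd (b : List (List Int)) (item : List Int) :
    SameShape (pvRectAdd b item) b := by
  unfold pvRectAdd
  split
  · exact sameShape_foldl _ _ (fun b (x : Int) =>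
      sameShape_foldl _ _ (fun b (y : Int) => sameShape_pvAdd2 b x.toNat y.toNat _) b) b
  · exact sameShape_refl b

theorem pvGet_pvRectAdd (b : List (List Int)) (item : List Int) (n m : Nat)
    (hlen : b.length = n) (hrow : ∀ i0, i0 < n → (m : Int) ≤ ((b.getD i0 []).length : Int))
    (hv : pvValid item n m) (i j : Nat) :
    pvGet (pvRectAdd b item) i j = pvGet b i j + pvContrib item i j := by
  obtain ⟨hl, h1, h2, h3, h4, h5, h6⟩ := hv
  match item with
  | [t0, r1, c1, r2, c2, d0] =>
    simp only [List.getD, List.getElem?_cons_zero, List.getElem?_cons_succ,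
      Option.getD_some] at h1 h2 h3 h4 h5 h6
    show pvGet ((PySem.List.pyRange r1 (r2 + 1) 1).foldl (fun b i =>
      (PySem.List.pyRange c1 (c2 + 1) 1).foldl
        (fun b j => pvAdd2 b i.toNat j.toNat (if t0 = 1 then -d0 else d0)) b) b) i j = _
    rw [pvGet_foldl_rect _ _ b _
      (fun x hx => by
        have := (PySem.List.mem_pyRange_one).mp hx
        constructor <;> omega)
      (fun x hx y hy => by
        have hx' := (PySem.List.mem_pyRange_one).mp hx
        have hy' := (PySem.List.mem_pyRange_one).mp hy
        have hr := hrow x.toNat (by omega)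
        constructor <;> omega)
      i j]
    rw [count_pyRange_one, count_pyRange_one]
    unfold pvContrib pvDelta
    simp only [List.getD, List.getElem?_cons_zero, List.getElem?_cons_succ, Option.getD_some]
    split_ifs <;> (try ring) <;> (exfalso; omega)
theorem pvGet_foldl_pvRectAdd (skill : List (List Int)) (b : List (List Int)) (n m : Nat)
    (hlen : b.length = n) (hrow : ∀ i0, i0 < n → (m : Int) ≤ ((b.getD i0 []).length : Int))
    (hv : ∀ item ∈ skill, pvValid item n m) (i j : Nat) :
    pvGet (skill.foldl pvRectAdd b) i j = pvGet b i j + pvT skill i j := by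
  induction skill generalizing b with
  | nil => simp [pvT]
  | cons item t ih =>
    have hshape := sameShape_pvRectAdd b item
    simp only [List.foldl_cons]
    rw [ih (pvRectAdd b item) (hshape.1.trans hlen)
        (fun i0 hi0 => by rw [hshape.2 i0]; exact hrow i0 hi0)
        (fun it hit => hv it (List.mem_cons_of_mem _ hit))]
    rw [pvGet_pvRectAdd b item n m hlen hrow (hv item List.mem_cons_self) i j]
    simp only [pvT, List.map_cons, List.sum_cons]
    ring

-- === A side: the difference array ===
def pvRect (g : List (List Int)) (R C : Nat) : Prop :=
  g.length = R ∧ ∀ i, i < R → (g.getD i []).length = C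

theorem pvRect_of_sameShape {g h : List (List Int)} {R C : Nat}
    (hs : SameShape g h) (hr : pvRect h R C) : pvRect g R C :=
  ⟨hs.1.trans hr.1, fun i hi => (hs.2 i).trans (hr.2 i hi)⟩

theorem pvRect_replicate (n m : Nat) :
    pvRect (List.replicate (n + 1) (List.replicate (m + 1) (0 : Int))) (n + 1) (m + 1) := by
  refine ⟨by simp, fun i hi => ?_⟩
  rw [getD_eq_getElem?_getD', List.getElem?_replicate]
  simp [hi]

theorem pvGet_replicate_zero (n m i j : Nat) :
    pvGet (List.replicate n (List.replicate m (0 : Int))) i j = 0 := by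
  unfold pvGet
  rw [getD_eq_getElem?_getD', List.getElem?_replicate]
  by_cases hi : i < n
  · simp only [if_pos hi, Option.getD_some]
    rw [List.getD_eq_getElem?_getD, List.getElem?_replicate]
    by_cases hj : j < m <;> simp [hj]
  · simp [hi]

theorem sameShape_pvCorners (g : List (List Int)) (item : List Int) :
    SameShape (pvCorners g item) g := by
  unfold pvCorners
  split
  · exact sameShape_trans (sameShape_pvAdd2 _ _ _ _)
      (sameShape_trans (sameShape_pvAdd2 _ _ _ _)
        (sameShape_trans (sameShape_pvAdd2 _ _ _ _) (sameShape_pvAdd2 _ _ _ _)))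
  · exact sameShape_refl g

theorem pvGet_pvCorners (g : List (List Int)) (item : List Int) (n m : Nat)
    (hr : pvRect g (n + 1) (m + 1)) (hv : pvValid item n m) (i j : Nat) :
    pvGet (pvCorners g item) i j = pvGet g i j + pvCorner item i j := by
  obtain ⟨hl, h1, h2, h3, h4, h5, h6⟩ := hv
  match item with
  | [t0, r1, c1, r2, c2, d0] =>
    simp only [List.getD, List.getElem?_cons_zero, List.getElem?_cons_succ,
      Option.getD_some] at h1 h2 h3 h4 h5 h6
    show pvGet (pvAdd2 (pvAdd2 (pvAdd2 (pvAdd2 g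
        r1.toNat c1.toNat (if t0 = 1 then -d0 else d0))
        r1.toNat (c2 + 1).toNat (if t0 = 1 then d0 else -d0))
        (r2 + 1).toNat c1.toNat (if t0 = 1 then d0 else -d0))
        (r2 + 1).toNat (c2 + 1).toNat (if t0 = 1 then -d0 else d0)) i j = _
    have s1 := sameShape_pvAdd2 g r1.toNat c1.toNat (if t0 = 1 then -d0 else d0)
    have s2 := sameShape_trans (sameShape_pvAdd2 _ r1.toNat (c2 + 1).toNat
      (if t0 = 1 then d0 else -d0)) s1
    have s3 := sameShape_trans (sameShape_pvAdd2 _ (r2 + 1).toNat c1.toNat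
      (if t0 = 1 then d0 else -d0)) s2
    have r0 := hr
    have r1' := pvRect_of_sameShape s1 hr
    have r2' := pvRect_of_sameShape s2 hr
    have r3' := pvRect_of_sameShape s3 hr
    rw [pvGet_pvAdd2 _ _ _ _ (by rw [r3'.1]; omega)
      (by rw [r3'.2 (r2 + 1).toNat (by omega)]; omega)]
    rw [pvGet_pvAdd2 _ _ _ _ (by rw [r2'.1]; omega)
      (by rw [r2'.2 (r2 + 1).toNat (by omega)]; omega)]
    rw [pvGet_pvAdd2 _ _ _ _ (by rw [r1'.1]; omega)
      (by rw [r1'.2 r1.toNat (by omega)]; omega)]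
    rw [pvGet_pvAdd2 _ _ _ _ (by rw [r0.1]; omega)
      (by rw [r0.2 r1.toNat (by omega)]; omega)]
    unfold pvCorner pvDelta
    simp only [List.getD, List.getElem?_cons_zero, List.getElem?_cons_succ, Option.getD_some]
    have e1 : (i = r1.toNat ∧ j = c1.toNat) ↔ ((i : Int) = r1 ∧ (j : Int) = c1) := by omega
    have e2 : (i = r1.toNat ∧ j = (c2 + 1).toNat) ↔ ((i : Int) = r1 ∧ (j : Int) = c2 + 1) := by omega
    have e3 : (i = (r2 + 1).toNat ∧ j = c1.toNat) ↔ ((i : Int) = r2 + 1 ∧ (j : Int) = c1) := by omega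
    have e4 : (i = (r2 + 1).toNat ∧ j = (c2 + 1).toNat) ↔ ((i : Int) = r2 + 1 ∧ (j : Int) = c2 + 1) := by omega
    rw [if_congr e1 rfl rfl, if_congr e2 rfl rfl, if_congr e3 rfl rfl, if_congr e4 rfl rfl]
    by_cases a1 : (i : Int) = r1 <;> by_cases a2 : (i : Int) = r2 + 1 <;>
      by_cases b1 : (j : Int) = c1 <;> by_cases b2 : (j : Int) = c2 + 1 <;>
      simp only [a1, a2, b1, b2, and_true, and_false, true_and, false_and, and_self,
        if_true, if_false, reduceIte] <;>
      (try (exfalso; omega)) <;> split_ifs <;> (try ring) <;> (exfalso; omega)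

theorem pvGet_foldl_pvCorners (skill : List (List Int)) (g : List (List Int)) (n m : Nat)
    (hr : pvRect g (n + 1) (m + 1)) (hv : ∀ item ∈ skill, pvValid item n m) (i j : Nat) :
    pvGet (skill.foldl pvCorners g) i j
      = pvGet g i j + (skill.map (fun it => pvCorner it i j)).sum := by
  induction skill generalizing g with
  | nil => simp
  | cons item t ih =>
    simp only [List.foldl_cons]
    rw [ih (pvCorners g item) (pvRect_of_sameShape (sameShape_pvCorners g item) hr)
        (fun it hit => hv it (List.mem_cons_of_mem _ hit))]
    rw [pvGet_pvCorners g item n m hr (hv item List.mem_cons_self) i j]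
    simp only [List.map_cons, List.sum_cons]
    ring
-- one row of A's first prefix pass: after processing columns 0..k-1, positions 0..k of
-- row i0 hold prefix sums of the original row, everything else is unchanged
theorem rowpass_inner (g : List (List Int)) (n m : Nat) (hr : pvRect g (n + 1) (m + 1))
    (i0 : Nat) (hi0 : i0 < n + 1) (k : Nat) (hk : k ≤ m) : ∀ i j,
    pvGet ((List.range k).foldl (fun g j => pvAdd2 g i0 (j + 1) (pvGet g i0 j)) g) i j
      = if i = i0 ∧ j ≤ k then ((List.range (j + 1)).map (fun j' => pvGet g i0 j')).sum
        else pvGet g i j := by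
  induction k with
  | zero =>
    intro i j
    simp only [List.range_zero, List.foldl_nil]
    split_ifs with h
    · obtain ⟨rfl, hj0⟩ := h
      have : j = 0 := by omega
      subst this
      simp [List.range_one]
    · rfl
  | succ k ih =>
    intro i j
    have hkm : k ≤ m := by omega
    rw [List.range_succ, List.foldl_append, List.foldl_cons, List.foldl_nil]
    set g' := (List.range k).foldl (fun g j => pvAdd2 g i0 (j + 1) (pvGet g i0 j)) g with hg'
    have hshape : SameShape g' g :=
      sameShape_foldl _ _ (fun b x => sameShape_pvAdd2 _ _ _ _) g
    have hrect := pvRect_of_sameShape hshape hr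
    rw [pvGet_pvAdd2 g' i0 (k + 1) (pvGet g' i0 k) (by rw [hrect.1]; omega)
      (by rw [hrect.2 i0 hi0]; omega) i j]
    have hik : pvGet g' i0 k
        = ((List.range (k + 1)).map (fun j' => pvGet g i0 j')).sum := by
      rw [ih hkm i0 k, if_pos ⟨rfl, le_refl k⟩]
    rw [ih hkm i j, hik]
    by_cases hii : i = i0
    · subst hii
      by_cases h1 : j ≤ k
      · rw [if_pos (by omega : i = i ∧ j ≤ k), if_neg (by omega : ¬(i = i ∧ j = k + 1)),
          if_pos (by omega : i = i ∧ j ≤ k + 1)]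
        ring
      · by_cases h2 : j = k + 1
        · rw [if_neg (by omega : ¬(i = i ∧ j ≤ k)), if_pos (by omega : i = i ∧ j = k + 1),
            if_pos (by omega : i = i ∧ j ≤ k + 1), h2]
          rw [List.range_succ (n := k + 1), List.map_append, List.sum_append]
          simp
          try ring
        · rw [if_neg (by omega : ¬(i = i ∧ j ≤ k)), if_neg (by omega : ¬(i = i ∧ j = k + 1)),
            if_neg (by omega : ¬(i = i ∧ j ≤ k + 1))]
          ring
    · rw [if_neg (by omega : ¬(i = i0 ∧ j ≤ k)), if_neg (by omega : ¬(i = i0 ∧ j = k + 1)),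
        if_neg (by omega : ¬(i = i0 ∧ j ≤ k + 1))]
      ring

-- A's whole first pass: rows 0..k-1 are row-prefix-summed
theorem rowpass_outer (g : List (List Int)) (n m : Nat) (hr : pvRect g (n + 1) (m + 1))
    (k : Nat) (hk : k ≤ n) : ∀ i j,
    pvGet ((List.range k).foldl (fun g i =>
        (List.range m).foldl (fun g j => pvAdd2 g i (j + 1) (pvGet g i j)) g) g) i j
      = if i < k ∧ j ≤ m then ((List.range (j + 1)).map (fun j' => pvGet g i j')).sum
        else pvGet g i j := by
  induction k with
  | zero =>
    intro i j
    simp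
  | succ k ih =>
    intro i j
    have hkn : k ≤ n := by omega
    rw [List.range_succ, List.foldl_append, List.foldl_cons, List.foldl_nil]
    set g' := (List.range k).foldl (fun g i =>
      (List.range m).foldl (fun g j => pvAdd2 g i (j + 1) (pvGet g i j)) g) g with hg'
    have hshape : SameShape g' g :=
      sameShape_foldl _ _ (fun b x =>
        sameShape_foldl _ _ (fun b y => sameShape_pvAdd2 _ _ _ _) b) g
    have hrect := pvRect_of_sameShape hshape hr
    rw [rowpass_inner g' n m hrect k (by omega) m le_rfl i j]
    have hrowk : ∀ j', pvGet g' k j' = pvGet g k j' := fun j' => by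
      rw [ih hkn k j', if_neg (by omega : ¬(k < k ∧ j' ≤ m))]
    by_cases hik : i = k
    · by_cases hjm : j ≤ m
      · rw [if_pos ⟨hik, hjm⟩, hik, if_pos (by omega : k < k + 1 ∧ j ≤ m)]
        exact congrArg List.sum (List.map_congr_left (fun j' _ => hrowk j'))
      · rw [if_neg (by omega : ¬(i = k ∧ j ≤ m)), ih hkn i j,
          if_neg (by omega : ¬(i < k ∧ j ≤ m)), if_neg (by omega : ¬(i < k + 1 ∧ j ≤ m))]
    · rw [if_neg (by omega : ¬(i = k ∧ j ≤ m)), ih hkn i j]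
      by_cases hlt : i < k ∧ j ≤ m
      · rw [if_pos hlt, if_pos (by omega : i < k + 1 ∧ j ≤ m)]
      · rw [if_neg hlt, if_neg (by omega : ¬(i < k + 1 ∧ j ≤ m))]

-- one column of A's second prefix pass
theorem colpass_inner (g : List (List Int)) (n m : Nat) (hr : pvRect g (n + 1) (m + 1))
    (j0 : Nat) (hj0 : j0 < m + 1) (k : Nat) (hk : k ≤ n) : ∀ i j,
    pvGet ((List.range k).foldl (fun g i => pvAdd2 g (i + 1) j0 (pvGet g i j0)) g) i j
      = if j = j0 ∧ i ≤ k then ((List.range (i + 1)).map (fun i' => pvGet g i' j0)).sum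
        else pvGet g i j := by
  induction k with
  | zero =>
    intro i j
    simp only [List.range_zero, List.foldl_nil]
    split_ifs with h
    · obtain ⟨rfl, hi0⟩ := h
      have : i = 0 := by omega
      subst this
      simp [List.range_one]
    · rfl
  | succ k ih =>
    intro i j
    have hkn : k ≤ n := by omega
    rw [List.range_succ, List.foldl_append, List.foldl_cons, List.foldl_nil]
    set g' := (List.range k).foldl (fun g i => pvAdd2 g (i + 1) j0 (pvGet g i j0)) g with hg'
    have hshape : SameShape g' g :=
      sameShape_foldl _ _ (fun b x => sameShape_pvAdd2 _ _ _ _) g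
    have hrect := pvRect_of_sameShape hshape hr
    rw [pvGet_pvAdd2 g' (k + 1) j0 (pvGet g' k j0) (by rw [hrect.1]; omega)
      (by rw [hrect.2 (k + 1) (by omega)]; omega) i j]
    have hik : pvGet g' k j0
        = ((List.range (k + 1)).map (fun i' => pvGet g i' j0)).sum := by
      rw [ih hkn k j0, if_pos ⟨rfl, le_refl k⟩]
    rw [ih hkn i j, hik]
    by_cases hjj : j = j0
    · subst hjj
      by_cases h1 : i ≤ k
      · rw [if_pos (by omega : j = j ∧ i ≤ k), if_neg (by omega : ¬(i = k + 1 ∧ j = j)),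
          if_pos (by omega : j = j ∧ i ≤ k + 1)]
        ring
      · by_cases h2 : i = k + 1
        · rw [if_neg (by omega : ¬(j = j ∧ i ≤ k)), if_pos (by omega : i = k + 1 ∧ j = j),
            if_pos (by omega : j = j ∧ i ≤ k + 1), h2]
          rw [List.range_succ (n := k + 1), List.map_append, List.sum_append]
          simp
          try ring
        · rw [if_neg (by omega : ¬(j = j ∧ i ≤ k)), if_neg (by omega : ¬(i = k + 1 ∧ j = j)),
            if_neg (by omega : ¬(j = j ∧ i ≤ k + 1))]
          ring
    · rw [if_neg (by omega : ¬(j = j0 ∧ i ≤ k)), if_neg (by omega : ¬(i = k + 1 ∧ j = j0)),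
        if_neg (by omega : ¬(j = j0 ∧ i ≤ k + 1))]
      ring

-- A's whole second pass: columns 0..k-1 are column-prefix-summed
theorem colpass_outer (g : List (List Int)) (n m : Nat) (hr : pvRect g (n + 1) (m + 1))
    (k : Nat) (hk : k ≤ m) : ∀ i j,
    pvGet ((List.range k).foldl (fun g j =>
        (List.range n).foldl (fun g i => pvAdd2 g (i + 1) j (pvGet g i j)) g) g) i j
      = if j < k ∧ i ≤ n then ((List.range (i + 1)).map (fun i' => pvGet g i' j)).sum
        else pvGet g i j := by
  induction k with
  | zero =>
    intro i j
    simp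
  | succ k ih =>
    intro i j
    have hkm : k ≤ m := by omega
    rw [List.range_succ, List.foldl_append, List.foldl_cons, List.foldl_nil]
    set g' := (List.range k).foldl (fun g j =>
      (List.range n).foldl (fun g i => pvAdd2 g (i + 1) j (pvGet g i j)) g) g with hg'
    have hshape : SameShape g' g :=
      sameShape_foldl _ _ (fun b x =>
        sameShape_foldl _ _ (fun b y => sameShape_pvAdd2 _ _ _ _) b) g
    have hrect := pvRect_of_sameShape hshape hr
    rw [colpass_inner g' n m hrect k (by omega) n le_rfl i j]
    have hcolk : ∀ i', pvGet g' i' k = pvGet g i' k := fun i' => by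
      rw [ih hkm i' k, if_neg (by omega : ¬(k < k ∧ i' ≤ n))]
    by_cases hjk : j = k
    · by_cases him : i ≤ n
      · rw [if_pos ⟨hjk, him⟩, hjk, if_pos (by omega : k < k + 1 ∧ i ≤ n)]
        exact congrArg List.sum (List.map_congr_left (fun i' _ => hcolk i'))
      · rw [if_neg (by omega : ¬(j = k ∧ i ≤ n)), ih hkm i j,
          if_neg (by omega : ¬(j < k ∧ i ≤ n)), if_neg (by omega : ¬(j < k + 1 ∧ i ≤ n))]
    · rw [if_neg (by omega : ¬(j = k ∧ i ≤ n)), ih hkm i j]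
      by_cases hlt : j < k ∧ i ≤ n
      · rw [if_pos hlt, if_pos (by omega : j < k + 1 ∧ i ≤ n)]
      · rw [if_neg hlt, if_neg (by omega : ¬(j < k + 1 ∧ i ≤ n))]

theorem pvGet_pvRowPass (g : List (List Int)) (n m : Nat) (hr : pvRect g (n + 1) (m + 1))
    (i j : Nat) :
    pvGet (pvRowPass g n m) i j
      = if i < n ∧ j ≤ m then ((List.range (j + 1)).map (fun j' => pvGet g i j')).sum
        else pvGet g i j :=
  rowpass_outer g n m hr n le_rfl i j

theorem pvGet_pvColPass (g : List (List Int)) (n m : Nat) (hr : pvRect g (n + 1) (m + 1))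
    (i j : Nat) :
    pvGet (pvColPass g m n) i j
      = if j < m ∧ i ≤ n then ((List.range (i + 1)).map (fun i' => pvGet g i' j)).sum
        else pvGet g i j :=
  colpass_outer g n m hr m le_rfl i j

theorem sameShape_pvRowPass (g : List (List Int)) (rows cols : Nat) :
    SameShape (pvRowPass g rows cols) g :=
  sameShape_foldl _ _ (fun b x =>
    sameShape_foldl _ _ (fun b y => sameShape_pvAdd2 _ _ _ _) b) g
theorem sum_range_mul_ind2 (c a b : Int) (k : Nat) :
    ((List.range k).map (fun x => c * ((if ((x : Nat) : Int) = a then (1 : Int) else 0)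
        - (if ((x : Nat) : Int) = b then (1 : Int) else 0)))).sum
      = c * ((if 0 ≤ a ∧ a < (k : Int) then 1 else 0)
        - (if 0 ≤ b ∧ b < (k : Int) then 1 else 0)) := by
  induction k with
  | zero =>
    simp only [List.range_zero, List.map_nil, List.sum_nil]
    split_ifs <;> (try ring) <;> (exfalso; omega)
  | succ k ih =>
    rw [List.range_succ, List.map_append, List.sum_append, ih]
    simp only [List.map_cons, List.map_nil, List.sum_cons, List.sum_nil]
    split_ifs <;> (try ring) <;> (exfalso; omega)

theorem sum_corner_box (item : List Int) (n m : Nat) (hv : pvValid item n m) (i j : Nat)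
    (hi : i < n) (hj : j < m) :
    ((List.range (i + 1)).map (fun i' =>
      ((List.range (j + 1)).map (fun j' => pvCorner item i' j')).sum)).sum
      = pvContrib item i j := by
  obtain ⟨hl, h1, h2, h3, h4, h5, h6⟩ := hv
  unfold pvCorner pvContrib
  rw [List.map_congr_left (fun i' _ =>
    sum_range_mul_ind2 (pvDelta item * ((if ((i' : Nat) : Int) = item.getD 1 0 then 1 else 0)
      - (if ((i' : Nat) : Int) = item.getD 3 0 + 1 then 1 else 0)))
      (item.getD 2 0) (item.getD 4 0 + 1) (j + 1))]
  set D := (if 0 ≤ item.getD 2 0 ∧ item.getD 2 0 < ((j + 1 : Nat) : Int) then (1 : Int) else 0)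
    - (if 0 ≤ item.getD 4 0 + 1 ∧ item.getD 4 0 + 1 < ((j + 1 : Nat) : Int) then (1 : Int) else 0)
    with hD
  rw [List.map_congr_left (show ∀ x ∈ List.range (i + 1),
      pvDelta item * ((if ((x : Nat) : Int) = item.getD 1 0 then (1 : Int) else 0)
        - (if ((x : Nat) : Int) = item.getD 3 0 + 1 then (1 : Int) else 0)) * D
      = (pvDelta item * D) * ((if ((x : Nat) : Int) = item.getD 1 0 then (1 : Int) else 0)
        - (if ((x : Nat) : Int) = item.getD 3 0 + 1 then (1 : Int) else 0))
      from fun x _ => by ring)]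
  rw [sum_range_mul_ind2 (pvDelta item * D) (item.getD 1 0) (item.getD 3 0 + 1) (i + 1)]
  rw [hD]
  push_cast
  split_ifs <;> (try ring) <;> (exfalso; omega)

theorem sum_sum_map_comm (l : List (List Int)) (f : Nat → Nat → List Int → Int) (I J : Nat) :
    ((List.range I).map (fun i =>
      ((List.range J).map (fun j => (l.map (f i j)).sum)).sum)).sum
      = (l.map (fun x => ((List.range I).map (fun i =>
          ((List.range J).map (fun j => f i j x)).sum)).sum)).sum := by
  induction l with
  | nil => simp
  | cons x t ih =>
    simp only [List.map_cons, List.sum_cons]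
    rw [← ih]
    rw [show (fun i => ((List.range J).map (fun j => f i j x + (t.map (f i j)).sum)).sum)
        = (fun i => ((List.range J).map (fun j => f i j x)).sum
            + ((List.range J).map (fun j => (t.map (f i j)).sum)).sum) from
      funext (fun i => by rw [← PySem.List.sum_map_add_int])]
    rw [← PySem.List.sum_map_add_int]

theorem pvContrib_col_zero (item : List Int) (n m : Nat) (hv : pvValid item n m)
    (i j : Nat) (hj : m ≤ j) : pvContrib item i j = 0 := by
  obtain ⟨hl, h1, h2, h3, h4, h5, h6⟩ := hv
  unfold pvContrib
  rw [if_neg (by omega)]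

theorem pvT_col_zero (skill : List (List Int)) (n m : Nat)
    (hv : ∀ item ∈ skill, pvValid item n m) (i j : Nat) (hj : m ≤ j) :
    pvT skill i j = 0 := by
  unfold pvT
  apply List.sum_eq_zero
  intro x hx
  obtain ⟨it, hit, rfl⟩ := List.mem_map.mp hx
  exact pvContrib_col_zero it n m (hv it hit) i j hj
-- the prefixed difference array agrees with the direct per-cell total
theorem pvGet_s3 (board skill : List (List Int))
    (hv : ∀ item ∈ skill, pvValid item board.length (board.getD 0 []).length)
    (i j : Nat) (hi : i < board.length) (hj : j < (board.getD 0 []).length) :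
    pvGet (pvColPass (pvRowPass (skill.foldl pvCorners
        (List.replicate (board.length + 1)
          (List.replicate ((board.getD 0 []).length + 1) (0 : Int))))
        board.length (board.getD 0 []).length)
      (board.getD 0 []).length board.length) i j = pvT skill i j := by
  set n := board.length with hn
  set m := (board.getD 0 []).length with hm
  have hr0 := pvRect_replicate n m
  set g0 := List.replicate (n + 1) (List.replicate (m + 1) (0 : Int)) with hg0
  set s1 := skill.foldl pvCorners g0 with hs1
  have hr1 : pvRect s1 (n + 1) (m + 1) :=
    pvRect_of_sameShape (sameShape_foldl _ _ sameShape_pvCorners g0) hr0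
  set s2 := pvRowPass s1 n m with hs2
  have hr2 : pvRect s2 (n + 1) (m + 1) :=
    pvRect_of_sameShape (sameShape_pvRowPass s1 n m) hr1
  rw [pvGet_pvColPass s2 n m hr2 i j, if_pos ⟨hj, by omega⟩]
  have hrow : ∀ i' ∈ List.range (i + 1), pvGet s2 i' j
      = ((List.range (j + 1)).map (fun j' => pvGet s1 i' j')).sum := by
    intro i' hi'
    have hi'n : i' < n := by have := List.mem_range.mp hi'; omega
    rw [hs2, pvGet_pvRowPass s1 n m hr1 i' j, if_pos ⟨hi'n, by omega⟩]
  rw [List.map_congr_left hrow]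
  have hs1get : ∀ i' j', pvGet s1 i' j' = (skill.map (fun it => pvCorner it i' j')).sum := by
    intro i' j'
    rw [hs1, pvGet_foldl_pvCorners skill g0 n m hr0 hv i' j', hg0,
      pvGet_replicate_zero (n + 1) (m + 1) i' j', zero_add]
  rw [List.map_congr_left (fun i' _ =>
    congrArg List.sum (List.map_congr_left (fun j' _ => hs1get i' j')))]
  rw [sum_sum_map_comm skill (fun i' j' it => pvCorner it i' j') (i + 1) (j + 1)]
  unfold pvT
  exact congrArg List.sum (List.map_congr_left (fun it hit =>
    sum_corner_box it n m (hv it hit) i j hi hj))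

-- one iteration of A's final loop: add V to columns 0..m-1 of row i0
theorem pvGet_foldl_addrow (m : Nat) (b : List (List Int)) (i0 : Nat) (f : Nat → Int)
    (hi0 : i0 < b.length) (hm : m ≤ (b.getD i0 []).length) (k : Nat) (hk : k ≤ m) :
    ∀ i j, pvGet ((List.range k).foldl (fun b j => pvAdd2 b i0 j (f j)) b) i j
      = pvGet b i j + (if i = i0 ∧ j < k then f j else 0) := by
  induction k with
  | zero =>
    intro i j
    simp
  | succ k ih =>
    intro i j
    have hkm : k ≤ m := by omega
    rw [List.range_succ, List.foldl_append, List.foldl_cons, List.foldl_nil]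
    set b' := (List.range k).foldl (fun b j => pvAdd2 b i0 j (f j)) b with hb'
    have hshape : SameShape b' b :=
      sameShape_foldl _ _ (fun b x => sameShape_pvAdd2 _ _ _ _) b
    rw [pvGet_pvAdd2 b' i0 k (f k) (by rw [hshape.1]; exact hi0)
      (by rw [hshape.2 i0]; omega) i j]
    rw [ih hkm i j]
    by_cases hii : i = i0
    · subst hii
      by_cases h1 : j < k
      · rw [if_pos ⟨rfl, h1⟩, if_neg (by omega : ¬(i = i ∧ j = k)),
          if_pos (by omega : i = i ∧ j < k + 1)]
        ring
      · by_cases h2 : j = k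
        · rw [if_neg (by omega : ¬(i = i ∧ j < k)), if_pos (by omega : i = i ∧ j = k),
            if_pos (by omega : i = i ∧ j < k + 1), h2]
          ring
        · rw [if_neg (by omega : ¬(i = i ∧ j < k)), if_neg (by omega : ¬(i = i ∧ j = k)),
            if_neg (by omega : ¬(i = i ∧ j < k + 1))]
          ring
    · rw [if_neg (by omega : ¬(i = i0 ∧ j < k)), if_neg (by omega : ¬(i = i0 ∧ j = k)),
        if_neg (by omega : ¬(i = i0 ∧ j < k + 1))]
      ring

-- rows other than i0 are untouched (as lists) by that iteration
theorem getD_foldl_addrow_ne (m : Nat) (b : List (List Int)) (i0 : Nat) (f : Nat → Int)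
    (i' : Nat) (h : i' ≠ i0) :
    ((List.range m).foldl (fun b j => pvAdd2 b i0 j (f j)) b).getD i' []
      = b.getD i' [] := by
  induction m with
  | zero => simp
  | succ k ih =>
    rw [List.range_succ, List.foldl_append, List.foldl_cons, List.foldl_nil,
      getD_pvAdd2_ne _ _ _ _ _ h, ih]

-- A's final loop invariant: processed rows carry their final value and are never
-- touched again; the accumulator counts the positives of the processed rows
theorem final_fold (V : Nat → Nat → Int) (board : List (List Int)) (m : Nat)
    (hm : ∀ i, i < board.length → m ≤ (board.getD i []).length) :
    ∀ k, k ≤ board.length →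
    SameShape ((List.range k).foldl (fun (st : List (List Int) × Int) i =>
        ((List.range m).foldl (fun b j => pvAdd2 b i j (V i j)) st.1,
         st.2 + (((((List.range m).foldl (fun b j => pvAdd2 b i j (V i j)) st.1).getD i
             []).filter (fun a => decide (a > 0))).length : Int))) (board, 0)).1 board ∧
    (∀ i j, pvGet ((List.range k).foldl (fun (st : List (List Int) × Int) i =>
        ((List.range m).foldl (fun b j => pvAdd2 b i j (V i j)) st.1,
         st.2 + (((((List.range m).foldl (fun b j => pvAdd2 b i j (V i j)) st.1).getD i
             []).filter (fun a => decide (a > 0))).length : Int))) (board, 0)).1 i j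
      = pvGet board i j + (if i < k ∧ j < m then V i j else 0)) ∧
    (∀ i, k ≤ i → ((List.range k).foldl (fun (st : List (List Int) × Int) i =>
        ((List.range m).foldl (fun b j => pvAdd2 b i j (V i j)) st.1,
         st.2 + (((((List.range m).foldl (fun b j => pvAdd2 b i j (V i j)) st.1).getD i
             []).filter (fun a => decide (a > 0))).length : Int))) (board, 0)).1.getD i []
      = board.getD i []) ∧
    ((List.range k).foldl (fun (st : List (List Int) × Int) i =>
        ((List.range m).foldl (fun b j => pvAdd2 b i j (V i j)) st.1,
         st.2 + (((((List.range m).foldl (fun b j => pvAdd2 b i j (V i j)) st.1).getD i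
             []).filter (fun a => decide (a > 0))).length : Int))) (board, 0)).2
      = ((List.range k).map (fun i => (((((List.range k).foldl
          (fun (st : List (List Int) × Int) i =>
            ((List.range m).foldl (fun b j => pvAdd2 b i j (V i j)) st.1,
             st.2 + (((((List.range m).foldl (fun b j => pvAdd2 b i j (V i j)) st.1).getD i
                 []).filter (fun a => decide (a > 0))).length : Int))) (board, 0)).1.getD i
          []).filter (fun a => decide (a > 0))).length : Int))).sum := by
  intro k
  induction k with
  | zero =>
    intro _
    refine ⟨sameShape_refl board, fun i j => by simp, fun i _ => rfl, by simp⟩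
  | succ k ih =>
    intro hk1
    obtain ⟨ihS, ihG, ihU, ihA⟩ := ih (by omega)
    set step := fun (st : List (List Int) × Int) i =>
        ((List.range m).foldl (fun b j => pvAdd2 b i j (V i j)) st.1,
         st.2 + (((((List.range m).foldl (fun b j => pvAdd2 b i j (V i j)) st.1).getD i
             []).filter (fun a => decide (a > 0))).length : Int)) with hstep
    set stk := (List.range k).foldl step (board, 0) with hstk
    have hfold : (List.range (k + 1)).foldl step (board, 0) = step stk k := by
      rw [List.range_succ, List.foldl_append, List.foldl_cons, List.foldl_nil]
    have hklen : k < board.length := by omega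
    have hshape1 : SameShape ((List.range m).foldl
        (fun b j => pvAdd2 b k j (V k j)) stk.1) stk.1 :=
      sameShape_foldl _ _ (fun b x => sameShape_pvAdd2 _ _ _ _) stk.1
    have hS' : SameShape (step stk k).1 board := sameShape_trans hshape1 ihS
    have hget' : ∀ i j, pvGet (step stk k).1 i j
        = pvGet board i j + (if i < k + 1 ∧ j < m then V i j else 0) := by
      intro i j
      show pvGet ((List.range m).foldl (fun b j => pvAdd2 b k j (V k j)) stk.1) i j = _
      rw [pvGet_foldl_addrow m stk.1 k (V k) (by rw [ihS.1]; exact hklen)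
        (by rw [ihS.2 k]; exact hm k hklen) m le_rfl i j, ihG i j]
      by_cases h1 : i < k ∧ j < m
      · rw [if_pos h1, if_neg (by omega : ¬(i = k ∧ j < m)),
          if_pos (by omega : i < k + 1 ∧ j < m)]
        ring
      · by_cases h2 : i = k ∧ j < m
        · rw [if_neg h1, if_pos h2, if_pos (by omega : i < k + 1 ∧ j < m), h2.1]
          ring
        · rw [if_neg h1, if_neg h2, if_neg (by omega : ¬(i < k + 1 ∧ j < m))]
          ring
    have hunt' : ∀ i, k + 1 ≤ i → (step stk k).1.getD i [] = board.getD i [] := by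
      intro i hi
      show ((List.range m).foldl (fun b j => pvAdd2 b k j (V k j)) stk.1).getD i [] = _
      rw [getD_foldl_addrow_ne m stk.1 k (V k) i (by omega), ihU i (by omega)]
    have hrows_stable : ∀ i, i < k → (step stk k).1.getD i [] = stk.1.getD i [] := by
      intro i hi
      exact getD_foldl_addrow_ne m stk.1 k (V k) i (by omega)
    refine ⟨by rw [hfold]; exact hS', by rw [hfold]; exact hget', by rw [hfold]; exact hunt', ?_⟩
    rw [hfold]
    show stk.2 + _ = _
    rw [ihA, List.range_succ, List.map_append, List.sum_append]
    simp only [List.map_cons, List.map_nil, List.sum_cons, List.sum_nil, add_zero]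
    have : ∀ i ∈ List.range k,
        ((((step stk k).1.getD i []).filter (fun a => decide (a > 0))).length : Int)
          = (((stk.1.getD i []).filter (fun a => decide (a > 0))).length : Int) := by
      intro i hi
      rw [hrows_stable i (List.mem_range.mp hi)]
    rw [List.map_congr_left (fun i hi => (this i hi).symm)]
-- named stages of A's pipeline (used only by the proofs below)
def pvS1 (board skill : List (List Int)) : List (List Int) :=
  skill.foldl pvCorners (List.replicate (board.length + 1)
    (List.replicate ((board.getD 0 []).length + 1) (0 : Int)))

def pvS2 (board skill : List (List Int)) : List (List Int) :=
  pvRowPass (pvS1 board skill) ((pvS1 board skill).length - 1)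
    (((pvS1 board skill).getD 0 []).length - 1)

def pvS3 (board skill : List (List Int)) : List (List Int) :=
  pvColPass (pvS2 board skill) (((pvS2 board skill).getD 0 []).length - 1)
    ((pvS2 board skill).length - 1)

theorem sum_range_getD (g : List (List Int)) (F : List Int → Int) :
    ((List.range g.length).map (fun i => F (g.getD i []))).sum = (g.map F).sum := by
  induction g with
  | nil => simp
  | cons r t ih =>
    rw [List.length_cons, List.range_succ_eq_map, List.map_cons, List.map_map, List.map_cons,
      List.sum_cons, List.sum_cons]
    rw [show ((fun i => F ((r :: t).getD i [])) ∘ Nat.succ) = (fun i => F (t.getD i [])) from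
      funext (fun i => by simp)]
    rw [ih]
    simp

theorem rows_eq (r1 r2 : List Int) (hlen : r1.length = r2.length)
    (h : ∀ j, j < r1.length → r1.getD j 0 = r2.getD j 0) : r1 = r2 := by
  apply List.ext_getElem hlen
  intro j h1 h2
  have hj := h j h1
  rwa [List.getD_eq_getElem r1 0 h1, List.getD_eq_getElem r2 0 h2] at hj

theorem solution_eq_alt (board skill : List (List Int)) (hpre : Pre_solution board skill) :
    solution board skill = solution_alt board skill := by
  obtain ⟨hne, hrows, hitems⟩ := hpre
  have hv : ∀ item ∈ skill, pvValid item board.length (board.getD 0 []).length := by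
    intro item hit
    exact hitems item hit
  have hm' : ∀ i, i < board.length → (board.getD 0 []).length ≤ (board.getD i []).length := by
    intro i hi
    have hmem : board.getD i [] ∈ board := by
      rw [getD_eq_getElem?_getD', List.getElem?_eq_getElem hi]
      exact List.getElem_mem hi
    exact hrows _ hmem
  -- A's pipeline stages have the expected dimensions
  have hr1 : pvRect (pvS1 board skill) (board.length + 1) ((board.getD 0 []).length + 1) :=
    pvRect_of_sameShape (sameShape_foldl _ _ sameShape_pvCorners _)
      (pvRect_replicate board.length (board.getD 0 []).length)
  have e1 : (pvS1 board skill).length - 1 = board.length := by rw [hr1.1]; omega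
  have e2 : ((pvS1 board skill).getD 0 []).length - 1 = (board.getD 0 []).length := by
    rw [hr1.2 0 (by omega)]; omega
  have hS2 : pvS2 board skill
      = pvRowPass (pvS1 board skill) board.length (board.getD 0 []).length := by
    unfold pvS2; rw [e1, e2]
  have hr2 : pvRect (pvS2 board skill) (board.length + 1) ((board.getD 0 []).length + 1) := by
    rw [hS2]; exact pvRect_of_sameShape (sameShape_pvRowPass _ _ _) hr1
  have e3 : ((pvS2 board skill).getD 0 []).length - 1 = (board.getD 0 []).length := by
    rw [hr2.2 0 (by omega)]; omega
  have e4 : (pvS2 board skill).length - 1 = board.length := by rw [hr2.1]; omega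
  have hS3 : pvS3 board skill
      = pvColPass (pvRowPass (pvS1 board skill) board.length (board.getD 0 []).length)
          (board.getD 0 []).length board.length := by
    unfold pvS3; rw [e3, e4, hS2]
  have hs3 : ∀ i j, i < board.length → j < (board.getD 0 []).length →
      pvGet (pvS3 board skill) i j = pvT skill i j := by
    intro i j hi hj
    rw [hS3]
    exact pvGet_s3 board skill hv i j hi hj
  -- A's result, with the final loop written as the fold that final_fold talks about
  have hA : solution board skill
      = ((List.range board.length).foldl (fun (st : List (List Int) × Int) i =>
          ((List.range (board.getD 0 []).length).foldl
              (fun b j => pvAdd2 b i j ((fun i j => pvGet (pvS3 board skill) i j) i j)) st.1,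
           st.2 + ((((List.range (board.getD 0 []).length).foldl
              (fun b j => pvAdd2 b i j ((fun i j => pvGet (pvS3 board skill) i j) i j))
                st.1).getD i []).filter (fun a => decide (a > 0))).length))
          (board, 0)).2 := rfl
  obtain ⟨hS, hG, _, hAcc⟩ := final_fold (fun i j => pvGet (pvS3 board skill) i j) board
    (board.getD 0 []).length hm' board.length le_rfl
  rw [hA, hAcc]
  -- B's result
  have hBshape : SameShape (skill.foldl pvRectAdd board) board :=
    sameShape_foldl _ _ sameShape_pvRectAdd board
  have hB : solution_alt board skill
      = (((skill.foldl pvRectAdd board).map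
          (fun row => ((row.filter (fun a => decide (a > 0))).length : Int)))).sum := by
    unfold solution_alt
    show ((skill.foldl pvRectAdd board).foldl
      (fun acc row => acc + ((row.filter (fun a => decide (a > 0))).length : Int)) 0) = _
    rw [PySem.List.foldl_add (skill.foldl pvRectAdd board) (fun (row : List Int) => ((row.filter (fun a => decide (a > 0))).length : Int)) 0]
    rw [zero_add]
  rw [hB, ← sum_range_getD (skill.foldl pvRectAdd board)
    (fun (row : List Int) => ((row.filter (fun a => decide (a > 0))).length : Int)), hBshape.1]
  -- the two final boards agree row by row
  apply congrArg List.sum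
  apply List.map_congr_left
  intro i hi
  have hilen : i < board.length := List.mem_range.mp hi
  have hroweq : (((List.range board.length).foldl (fun (st : List (List Int) × Int) i =>
        ((List.range (board.getD 0 []).length).foldl
            (fun b j => pvAdd2 b i j ((fun i j => pvGet (pvS3 board skill) i j) i j)) st.1,
         st.2 + ((((List.range (board.getD 0 []).length).foldl
            (fun b j => pvAdd2 b i j ((fun i j => pvGet (pvS3 board skill) i j) i j))
              st.1).getD i []).filter (fun a => decide (a > 0))).length))
        (board, 0)).1.getD i []) = (skill.foldl pvRectAdd board).getD i [] := by
    apply rows_eq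
    · rw [hS.2 i, ← hBshape.2 i]
    · intro j hj
      have hjb : j < (board.getD i []).length := by
        rw [hS.2 i] at hj; exact hj
      have hgA : pvGet ((List.range board.length).foldl (fun (st : List (List Int) × Int) i =>
          ((List.range (board.getD 0 []).length).foldl
              (fun b j => pvAdd2 b i j ((fun i j => pvGet (pvS3 board skill) i j) i j)) st.1,
           st.2 + ((((List.range (board.getD 0 []).length).foldl
              (fun b j => pvAdd2 b i j ((fun i j => pvGet (pvS3 board skill) i j) i j))
                st.1).getD i []).filter (fun a => decide (a > 0))).length))
          (board, 0)).1 i j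
          = pvGet board i j
            + (if i < board.length ∧ j < (board.getD 0 []).length
               then pvGet (pvS3 board skill) i j else 0) := hG i j
      have hgB : pvGet (skill.foldl pvRectAdd board) i j = pvGet board i j + pvT skill i j :=
        pvGet_foldl_pvRectAdd skill board board.length (board.getD 0 []).length rfl
          (fun i0 hi0 => by exact_mod_cast hm' i0 hi0) hv i j
      show pvGet _ i j = pvGet _ i j
      rw [hgA, hgB]
      by_cases hjm : j < (board.getD 0 []).length
      · rw [if_pos ⟨hilen, hjm⟩, hs3 i j hilen hjm]
      · rw [if_neg (fun hc => hjm hc.2),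
          pvT_col_zero skill board.length (board.getD 0 []).length hv i j (by omega)]
  rw [hroweq]

-- ===== VERDICT (by name: the statement is the Claim_ definition above) =====
theorem solution_spec : Claim_equal_solution := by
  intro board skill _ hpre
  unfold Spec_solution
  exact solution_eq_alt board skill hpre
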